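-- pv_equiv track=rewrite | github.com/stephen-w-choo/foobar-solutions | Level 5 problems/5_Expanding_nebula.py | new_frontier
-- ===== SOURCE A (Python) =====
-- def new_frontier(length, target, frontier_state):
--     new_frontiers = []
--     a = frontier_state & 1
--     b = frontier_state >> 1 & 1
--     for i in range(4):
--         c = i & 1
--         d = i >> 1 & 1
--         if target & 1 == 1:
--             if a + b + c + d == 1:
--                 new_frontiers.append(i)
--         else:
--             if a + b + c + d != 1:
--                 new_frontiers.append(i)
--
--     for i in range(1, length):
--         prev_frontier = new_frontiers
--         new_frontiers = []
--         a = frontier_state >> i & 1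
--         b = frontier_state >> (i+1) & 1
--         for frontier in prev_frontier:
--             c = frontier >> i & 1
--             if target >> i & 1 == 1:
--                 if a + b + c == 1:
--                     new_frontiers.append(frontier)
--                 elif a + b + c == 0:
--                     frontier = frontier + (1 << (i+1))
--                     new_frontiers.append(frontier)
--             else:
--                 if a + b + c == 0:
--                     new_frontiers.append(frontier)
--                 elif a + b + c == 1:
--                     frontier = frontier + (1 << (i+1))
--                     new_frontiers.append(frontier)
--                 else:
--                     new_frontiers.append(frontier)
--                     frontier = frontier + (1 << (i+1))
--                     new_frontiers.append(frontier)
--     return(new_frontiers)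
-- ===== SOURCE B (Python) =====
-- def new_frontier(length, target, frontier_state):
--     # Depth-first backtracking over bit positions with an explicit stack,
--     # instead of rebuilding whole frontier lists level by level.
--     a0 = frontier_state & 1
--     b0 = frontier_state >> 1 & 1
--     stack = []
--     for i in range(3, -1, -1):
--         c = i & 1
--         d = i >> 1 & 1
--         if (target & 1 == 1) == (a0 + b0 + c + d == 1):
--             stack.append((1, i))
--     out = []
--     while stack:
--         i, f = stack.pop()
--         if i >= length:
--             out.append(f)
--             continue
--         a = frontier_state >> i & 1
--         b = frontier_state >> (i + 1) & 1
--         c = f >> i & 1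
--         s = a + b + c
--         if target >> i & 1 == 1:
--             if s == 1:
--                 stack.append((i + 1, f))
--             elif s == 0:
--                 stack.append((i + 1, f + (1 << (i + 1))))
--         else:
--             if s == 0:
--                 stack.append((i + 1, f))
--             elif s == 1:
--                 stack.append((i + 1, f + (1 << (i + 1))))
--             else:
--                 stack.append((i + 1, f + (1 << (i + 1))))
--                 stack.append((i + 1, f))
--     return out
-- ===== Notes on version B (the rewrite author's own statement) =====
-- stated objective: alternative
-- what changed: Replaces A's iterative level-by-level rebuilding of the whole frontier list (one pass per bit position) with a recursive depth-first backtracking search over bit positions that extends one partial frontier at a time, seeded by the valid 2-bit prefixes.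
import Mathlib
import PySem

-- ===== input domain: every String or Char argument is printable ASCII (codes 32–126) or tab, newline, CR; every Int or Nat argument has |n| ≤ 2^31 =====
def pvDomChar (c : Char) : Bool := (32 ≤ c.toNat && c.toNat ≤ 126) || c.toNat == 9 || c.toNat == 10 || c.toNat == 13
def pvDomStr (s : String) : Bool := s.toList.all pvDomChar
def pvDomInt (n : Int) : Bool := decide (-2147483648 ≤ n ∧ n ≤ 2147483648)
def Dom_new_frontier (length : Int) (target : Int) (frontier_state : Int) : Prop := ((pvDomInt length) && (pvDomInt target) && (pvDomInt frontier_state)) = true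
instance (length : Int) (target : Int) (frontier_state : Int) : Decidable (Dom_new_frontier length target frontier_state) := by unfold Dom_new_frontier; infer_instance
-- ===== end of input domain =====

-- B replaces A's level-by-level rebuilding of the frontier list with an explicit-stack
-- depth-first backtracking search over bit positions (objective: alternative decomposition).

-- Shared primitive helpers for Python's bit operations, used identically by both ports.
-- pvTwoPow k = 2 ^ k, computed by binary exponentiation so evaluation stays fast.
def pvTwoPow (k : Nat) : Nat :=
  if h : k = 0 then 1
  else
    let half := pvTwoPow (k / 2)
    if k % 2 = 0 then half * half else 2 * (half * half)
termination_by k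
decreasing_by omega

-- Exact port of Python's 'x >> k & 1' (arithmetic shift on an infinite two's-complement
-- integer): for x ≥ 0 it is (x / 2^k) % 2, and for x < 0, with m = -x - 1 ≥ 0, Python's
-- floor shift gives x >> k = -(m / 2^k) - 1, whose low bit is 1 - ((m / 2^k) % 2).
def pyBit (x : Int) (k : Nat) : Int :=
  if 0 ≤ x then ((x.toNat / pvTwoPow k) % 2 : Nat)
  else 1 - (((-x - 1).toNat / pvTwoPow k % 2 : Nat) : Int)

-- ===== PORT A =====
-- Body of A's loop 'for i in range(1, length)'; every i there is ≥ 1, so the Python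
-- shift amounts i and i+1 are exactly i.toNat and i.toNat + 1, and 'frontier >> i & 1'
-- is pyBit frontier i.toNat; '1 << (i+1)' is pvTwoPow (i.toNat + 1) (exact, i ≥ 0).
def nfBody (target : Int) (frontier_state : Int) (prev_frontier : List Int) (i : Int) : List Int :=
  let a := pyBit frontier_state i.toNat
  let b := pyBit frontier_state (i.toNat + 1)
  prev_frontier.foldl (fun (acc : List Int) (frontier : Int) =>
    let c := pyBit frontier i.toNat
    if pyBit target i.toNat = 1 then
      if a + b + c = 1 then acc ++ [frontier]
      else if a + b + c = 0 then acc ++ [frontier + (pvTwoPow (i.toNat + 1) : Int)]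
      else acc
    else
      if a + b + c = 0 then acc ++ [frontier]
      else if a + b + c = 1 then acc ++ [frontier + (pvTwoPow (i.toNat + 1) : Int)]
      else (acc ++ [frontier]) ++ [frontier + (pvTwoPow (i.toNat + 1) : Int)]) []

def new_frontier (length : Int) (target : Int) (frontier_state : Int) : List Int :=
  let a := PySem.Int.band frontier_state 1
  let b := pyBit frontier_state 1
  let seeds := (PySem.List.pyRange 0 4 1).foldl (fun acc i =>
    let c := PySem.Int.band i 1
    let d := pyBit i 1
    if PySem.Int.band target 1 = 1 then
      if a + b + c + d = 1 then acc ++ [i] else acc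
    else
      if a + b + c + d ≠ 1 then acc ++ [i] else acc) []
  (PySem.List.pyRange 1 length 1).foldl (nfBody target frontier_state) seeds

-- ===== PORT B =====
-- Source B's while-loop over the explicit stack (top of the Python list = head of this
-- list; push = cons, pop = match on the head).  Stack entries are (i, f); every i on
-- the stack is ≥ 1, so pyBit/pvTwoPow at i.toNat are exact as in port A.
def nfLoop (length : Int) (target : Int) (frontier_state : Int) : List (Int × Int) → List Int → List Int
  | [], out => out
  | (i, f) :: st, out =>
    if length ≤ i then nfLoop length target frontier_state st (out ++ [f])
    else
      let a := pyBit frontier_state i.toNat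
      let b := pyBit frontier_state (i.toNat + 1)
      let c := pyBit f i.toNat
      let s := a + b + c
      if pyBit target i.toNat = 1 then
        if s = 1 then nfLoop length target frontier_state ((i + 1, f) :: st) out
        else if s = 0 then nfLoop length target frontier_state ((i + 1, f + (pvTwoPow (i.toNat + 1) : Int)) :: st) out
        else nfLoop length target frontier_state st out
      else
        if s = 0 then nfLoop length target frontier_state ((i + 1, f) :: st) out
        else if s = 1 then nfLoop length target frontier_state ((i + 1, f + (pvTwoPow (i.toNat + 1) : Int)) :: st) out
        else nfLoop length target frontier_state
          ((i + 1, f) :: (i + 1, f + (pvTwoPow (i.toNat + 1) : Int)) :: st) out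
termination_by st _ => (st.map (fun e => 3 ^ (length - e.1).toNat)).sum
decreasing_by
  all_goals simp only [List.map_cons, List.sum_cons]
  all_goals try (have he : (length - i).toNat = (length - (i + 1)).toNat + 1 := by omega
                 rw [he, pow_succ])
  all_goals have h1 : 0 < 3 ^ (length - (i + 1)).toNat := Nat.pow_pos (by norm_num)
  all_goals have h2 : 0 < 3 ^ (length - i).toNat := Nat.pow_pos (by norm_num)
  all_goals omega

def new_frontier_alt (length : Int) (target : Int) (frontier_state : Int) : List Int :=
  let a0 := PySem.Int.band frontier_state 1
  let b0 := pyBit frontier_state 1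
  let stack := (PySem.List.pyRange 3 (-1) (-1)).foldl (fun st i =>
    let c := PySem.Int.band i 1
    let d := pyBit i 1
    if (PySem.Int.band target 1 = 1) ↔ (a0 + b0 + c + d = 1) then ((1 : Int), i) :: st else st) []
  nfLoop length target frontier_state stack []

-- ===== PRECONDITION & SPEC =====
def Spec_new_frontier (length : Int) (target : Int) (frontier_state : Int) (out : List Int) : Prop := out = new_frontier_alt length target frontier_state
instance (length : Int) (target : Int) (frontier_state : Int) (out : List Int) : Decidable (Spec_new_frontier length target frontier_state out) := by unfold Spec_new_frontier; infer_instance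

-- ===== CLAIM (what is proved, stated in full; the proofs are below) =====
def Claim_equal_new_frontier : Prop := ∀ (length : Int) (target : Int) (frontier_state : Int), Dom_new_frontier length target frontier_state → Spec_new_frontier length target frontier_state (new_frontier length target frontier_state)

-- ===== LEMMAS AND PROOFS =====

-- Recursive description of the depth-first search: what the stack machine computes
-- for one entry (rem = number of levels still to process, i = bit position).
def nfDfs (target : Int) (frontier_state : Int) : Nat → Nat → Int → List Int
  | 0, _, f => [f]
  | rem + 1, i, f =>
    let a := pyBit frontier_state i
    let b := pyBit frontier_state (i + 1)
    let c := pyBit f i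
    let s := a + b + c
    if pyBit target i = 1 then
      if s = 1 then nfDfs target frontier_state rem (i + 1) f
      else if s = 0 then nfDfs target frontier_state rem (i + 1) (f + (pvTwoPow (i + 1) : Int))
      else []
    else
      if s = 0 then nfDfs target frontier_state rem (i + 1) f
      else if s = 1 then nfDfs target frontier_state rem (i + 1) (f + (pvTwoPow (i + 1) : Int))
      else nfDfs target frontier_state rem (i + 1) f ++
           nfDfs target frontier_state rem (i + 1) (f + (pvTwoPow (i + 1) : Int))

-- The list of values A's inner loop appends for a single frontier at level i.
def nfChild (target : Int) (frontier_state : Int) (i : Nat) (f : Int) : List Int :=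
  let a := pyBit frontier_state i
  let b := pyBit frontier_state (i + 1)
  let c := pyBit f i
  let s := a + b + c
  if pyBit target i = 1 then
    if s = 1 then [f]
    else if s = 0 then [f + (pvTwoPow (i + 1) : Int)]
    else []
  else
    if s = 0 then [f]
    else if s = 1 then [f + (pvTwoPow (i + 1) : Int)]
    else [f, f + (pvTwoPow (i + 1) : Int)]

theorem nfDfs_succ (t fs : Int) (rem i : Nat) (f : Int) :
    nfDfs t fs (rem + 1) i f = (nfChild t fs i f).flatMap (nfDfs t fs rem (i + 1)) := by
  simp only [nfDfs, nfChild]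
  split_ifs <;> simp

theorem nfBody_eq (t fs : Int) (i : Nat) (prev : List Int) :
    nfBody t fs prev (i : Int) = prev.flatMap (nfChild t fs i) := by
  have h2 : prev.foldl (fun acc f => acc ++ nfChild t fs i f) [] = [] ++ prev.flatMap (nfChild t fs i) := by
    rw [PySem.List.foldl_append_eq_flatMap]
  rw [List.nil_append] at h2
  rw [← h2]
  simp only [nfBody]
  apply List.foldl_ext
  intro acc f _
  simp only [nfChild, Int.toNat_natCast]
  split_ifs <;> simp

-- A's level loop from position i, run for rem more levels, equals flatMapping the DFS.
theorem levels_eq (t fs : Int) (rem : Nat) : ∀ (i : Nat) (prev : List Int),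
    (PySem.List.pyRange (i : Int) ((i : Int) + (rem : Int)) 1).foldl (nfBody t fs) prev
      = prev.flatMap (nfDfs t fs rem i) := by
  induction rem with
  | zero =>
    intro i prev
    rw [PySem.List.pyRange_one_eq_nil (by omega)]
    simp [nfDfs]
  | succ rem ih =>
    intro i prev
    rw [PySem.List.pyRange_one_cons (by omega)]
    rw [List.foldl_cons, nfBody_eq]
    rw [show (i : Int) + ((rem + 1 : Nat) : Int) = ((i + 1 : Nat) : Int) + (rem : Int) by push_cast; ring,
        show ((i : Int) + 1) = ((i + 1 : Nat) : Int) by push_cast; ring]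
    rw [ih (i + 1), List.flatMap_assoc]
    congr 1
    funext f
    rw [nfDfs_succ]

-- The stack machine computes, in order, the DFS of each of its entries.
theorem nfLoop_spec (L t fs : Int) : ∀ (n : Nat) (st : List (Int × Int)) (out : List Int),
    (st.map (fun e => 3 ^ (L - e.1).toNat)).sum = n →
    (∀ e ∈ st, 1 ≤ e.1) →
    nfLoop L t fs st out
      = out ++ st.flatMap (fun e => nfDfs t fs (L - e.1).toNat e.1.toNat e.2) := by
  intro n
  induction n using Nat.strong_induction_on with
  | _ n ih =>
    intro st out hm hw
    match st with
    | [] => simp [nfLoop]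
    | (i, f) :: st =>
      simp only [List.map_cons, List.sum_cons] at hm
      have hi : 1 ≤ i := hw (i, f) (List.mem_cons_self ..)
      have hwst : ∀ e ∈ st, 1 ≤ e.1 := fun e he => hw e (List.mem_cons_of_mem _ he)
      by_cases hL : L ≤ i
      · have h0 : (L - i).toNat = 0 := by omega
        have hp : 0 < 3 ^ (L - i).toNat := Nat.pow_pos (by norm_num)
        rw [nfLoop]
        simp only [if_pos hL]
        rw [ih _ (by omega) st (out ++ [f]) rfl hwst]
        simp [h0, nfDfs]
      · have hrem : (L - i).toNat = (L - (i + 1)).toNat + 1 := by omega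
        have hpow : 3 ^ (L - i).toNat = 3 ^ (L - (i + 1)).toNat * 3 := by rw [hrem, pow_succ]
        have hp1 : 0 < 3 ^ (L - (i + 1)).toNat := Nat.pow_pos (by norm_num)
        have hcast : (i + 1).toNat = i.toNat + 1 := by omega
        have hw1 : ∀ (f' : Int), ∀ e ∈ ((i + 1, f') :: st), 1 ≤ e.1 := by
          intro f' e he
          rcases List.mem_cons.mp he with h' | h'
          · subst h'; omega
          · exact hwst e h'
        have hw2 : ∀ (f' f'' : Int), ∀ e ∈ ((i + 1, f') :: (i + 1, f'') :: st), 1 ≤ e.1 := by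
          intro f' f'' e he
          rcases List.mem_cons.mp he with h' | h'
          · subst h'; omega
          · exact hw1 f'' e h'
        rw [nfLoop]
        simp only [if_neg hL]
        simp only [List.flatMap_cons, hrem, nfDfs]
        split_ifs <;>
          [rw [ih _ (by simp only [List.map_cons, List.sum_cons]; omega) _ _ rfl (hw1 _)];
           rw [ih _ (by simp only [List.map_cons, List.sum_cons]; omega) _ _ rfl (hw1 _)];
           rw [ih _ (by omega) st out rfl hwst];
           rw [ih _ (by simp only [List.map_cons, List.sum_cons]; omega) _ _ rfl (hw1 _)];
           rw [ih _ (by simp only [List.map_cons, List.sum_cons]; omega) _ _ rfl (hw1 _)];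
           rw [ih _ (by simp only [List.map_cons, List.sum_cons]; omega) _ _ rfl (hw2 _ _)]] <;>
          simp [hcast]

-- range(1, length) runs for exactly (length - 1).toNat levels.
theorem pyRange_len (length : Int) :
    PySem.List.pyRange 1 length 1 = PySem.List.pyRange ((1 : Nat) : Int) (((1 : Nat) : Int) + (((length - 1).toNat : Nat) : Int)) 1 := by
  by_cases h : 1 ≤ length
  · congr 1
    all_goals omega
  · rw [PySem.List.pyRange_one_eq_nil (by omega), PySem.List.pyRange_one_eq_nil (by omega)]

set_option maxHeartbeats 2000000 in
theorem new_frontier_eq (length target frontier_state : Int) :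
    new_frontier length target frontier_state = new_frontier_alt length target frontier_state := by
  simp only [new_frontier, new_frontier_alt]
  rw [pyRange_len, levels_eq]
  have hstack :
      (PySem.List.pyRange 3 (-1) (-1)).foldl (fun st i =>
        let c := PySem.Int.band i 1
        let d := pyBit i 1
        if (PySem.Int.band target 1 = 1) ↔
            (PySem.Int.band frontier_state 1 + pyBit frontier_state 1 + c + d = 1) then
          ((1 : Int), i) :: st else st) []
      = ((PySem.List.pyRange 0 4 1).foldl (fun acc i =>
          let c := PySem.Int.band i 1
          let d := pyBit i 1
          if PySem.Int.band target 1 = 1 then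
            if PySem.Int.band frontier_state 1 + pyBit frontier_state 1 + c + d = 1 then acc ++ [i] else acc
          else
            if PySem.Int.band frontier_state 1 + pyBit frontier_state 1 + c + d ≠ 1 then acc ++ [i] else acc) []).map
          (fun s => ((1 : Int), s)) := by
    rw [show PySem.List.pyRange 3 (-1) (-1) = [3, 2, 1, 0] from by decide,
        show PySem.List.pyRange 0 4 1 = [0, 1, 2, 3] from by decide]
    simp only [List.foldl_cons, List.foldl_nil]
    by_cases ht : PySem.Int.band target 1 = 1 <;>
      simp only [ht, true_iff, false_iff, if_true, if_false] <;>
      split_ifs <;> simp_all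
  rw [hstack, nfLoop_spec _ _ _ _ _ _ rfl (by intro e he; rcases List.mem_map.mp he with ⟨s, _, rfl⟩; simp)]
  rw [List.flatMap_map]
  simp
-- ===== VERDICT (by name: the statement is the Claim_ definition above) =====
theorem new_frontier_spec : Claim_equal_new_frontier := by
  intro length target frontier_state _
  unfold Spec_new_frontier
  exact new_frontier_eq length target frontier_state
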